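-- pv_equiv track=rewrite | github.com/AdamZhouSE/pythonHomework | Code/CodeRecords/2692/60730/288979.py | isValid
-- ===== SOURCE A (Python) =====
-- def isValid(weight, boat, D):
--     if boat * D < sum(weight):
--         return False
--
--     i, cnt = 0, 0
--     while i < len(weight):
--         if cnt + weight[i] > boat:
--             D -= 1
--             cnt = 0
--             if D == 0:
--                 return False
--             continue
--
--         cnt += weight[i]
--         i += 1
--
--     return True
-- ===== SOURCE B (Python) =====
-- def boats_needed(ws, boat):
--     """Number of boats the in-order loading needs, or None if some item
--     can never start a boat (item > boat).  Splits off the maximal prefix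
--     whose running sums fit one boat, then recurses on the remaining slice."""
--     if not ws:
--         return 0
--     if ws[0] > boat:
--         return None
--     s, k = ws[0], 1
--     while k < len(ws) and s + ws[k] <= boat:
--         s += ws[k]
--         k += 1
--     rest = boats_needed(ws[k:], boat)
--     return None if rest is None else 1 + rest
--
-- def isValid(weight, boat, D):
--     if boat * D < sum(weight):
--         return False
--     n = boats_needed(weight, boat)
--     return n is not None and n <= D
-- ===== Notes on version B (the rewrite author's own statement) =====
-- stated objective: alternative
-- what changed: A's index-retry while loop that mutates D and re-tests the same item via continue is replaced by a recursive divide: boats_needed splits off the maximal prefix whose running sums fit one boat (an inner scan), recurses on the remaining slice, and returns an optional segment count that is compared with D once at the end.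
-- intended difference: On inputs with D <= 0 where the boat*D >= sum(weight) prefilter passes and every item fits a boat (so A's loop never stalls), A returns True because its counter D can never be decremented exactly to 0, even though no cargo fits in zero or negative boats; B returns False (except for empty cargo with D == 0, where both return True), which is the intended answer. — e.g. on isValid([-1], 1, 0): A returns true, B returns false
-- outside the precondition, e.g. on isValid([-5, 7, -3], 3, 0): A returns True, B returns False; on isValid([5, -9], 3, 0): A does not finish within the time limit, B returns False
import Mathlib
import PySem

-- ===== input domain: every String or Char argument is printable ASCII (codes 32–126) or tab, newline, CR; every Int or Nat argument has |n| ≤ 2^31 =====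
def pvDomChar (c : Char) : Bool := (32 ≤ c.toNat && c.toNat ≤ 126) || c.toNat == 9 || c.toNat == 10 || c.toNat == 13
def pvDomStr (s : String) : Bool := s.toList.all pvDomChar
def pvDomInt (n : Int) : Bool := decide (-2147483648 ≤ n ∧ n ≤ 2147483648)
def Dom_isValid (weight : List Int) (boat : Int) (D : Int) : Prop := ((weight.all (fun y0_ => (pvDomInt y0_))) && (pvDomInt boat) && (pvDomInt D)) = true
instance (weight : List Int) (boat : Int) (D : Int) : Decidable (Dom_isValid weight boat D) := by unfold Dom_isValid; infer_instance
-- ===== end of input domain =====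

-- B replaces A's index-retry while loop (mutating D, re-testing the same item via continue) by a
-- recursive divide: split off the maximal prefix whose running sums fit one boat, recurse on the
-- remaining slice, count segments, and compare the count with D at the end (alternative decomposition).


-- ===== PORT A =====
-- A's while loop, step for step, over the remaining suffix of weight (i only moves forward and the
-- list is never changed, so index i ↦ remaining list). The fuel argument is only a totality guard:
-- A's loop diverges on some inputs excluded by Pre_; on every input Pre_ admits, the supplied fuel
-- exceeds the number of loop iterations (proved by the lemmas below), so the 0-fuel branch is unreachable.
def isValidLoop (fuel : Nat) (ws : List Int) (boat : Int) (cnt : Int) (D : Int) : Bool :=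
  match fuel with
  | 0 => false   -- unreachable under Pre_
  | fuel + 1 =>
    match ws with
    | [] => true
    | w :: rest =>
      if cnt + w > boat then
        if D - 1 = 0 then false
        else isValidLoop fuel (w :: rest) boat 0 (D - 1)   -- continue: same item, cnt := 0, D -= 1
      else isValidLoop fuel rest boat (cnt + w) D

def isValid (weight : List Int) (boat : Int) (D : Int) : Bool :=
  if boat * D < weight.sum then false
  else isValidLoop (2 * weight.length + (max D 0).toNat + 1) weight boat 0 D

-- ===== PORT B =====
-- Source B's inner while loop: how many further items of ws extend a boat already holding s.
def fitPrefix (ws : List Int) (boat : Int) (s : Int) : Nat :=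
  match ws with
  | [] => 0
  | w :: rest => if s + w ≤ boat then fitPrefix rest boat (s + w) + 1 else 0

-- Source B's boats_needed: strip the maximal fitting prefix, recurse on the remaining slice.
-- The fuel argument is only a structural-termination guard: every recursive call strictly
-- shortens the slice, so with fuel = ws.length the 0-fuel branch is unreachable (lemma below).
def boatsNeeded (fuel : Nat) (ws : List Int) (boat : Int) : Option Nat :=
  match fuel, ws with
  | _, [] => some 0
  | 0, _ :: _ => none   -- unreachable for fuel ≥ ws.length
  | fuel + 1, w :: rest =>
    if w > boat then none
    else
      match boatsNeeded fuel (rest.drop (fitPrefix rest boat w)) boat with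
      | none => none
      | some r => some (1 + r)

def isValid_alt (weight : List Int) (boat : Int) (D : Int) : Bool :=
  if boat * D < weight.sum then false
  else
    match boatsNeeded weight.length weight boat with
    | none => false
    | some n => decide ((n : Int) ≤ D)

-- ===== PRECONDITION & SPEC =====
-- Pre_ excludes the inputs with D ≤ 0, an over-capacity item, and a passing boat*D ≥ sum(weight)
-- prefilter: there A's retry loop stalls whenever the greedy run reaches such an item with an empty
-- current load — decrementing D past 0 forever (divergence) — and otherwise returns an accidental True.
def Pre_isValid (weight : List Int) (boat : Int) (D : Int) : Prop :=
  1 ≤ D ∨ boat * D < weight.sum ∨ ∀ w ∈ weight, w ≤ boat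
instance (weight : List Int) (boat : Int) (D : Int) : Decidable (Pre_isValid weight boat D) := by
  unfold Pre_isValid; infer_instance

def pvWitness_isValid : List Int × Int × Int := ([2, 3], 5, 2)

-- On inputs with D ≤ 0 where the boat*D ≥ sum(weight) prefilter passes and every item fits a boat
-- (so A's loop never stalls), A returns True because its counter D can never be decremented exactly
-- to 0, even though no cargo fits in zero or negative boats; B returns False (except for empty
-- cargo with D == 0, where both return True), which is the intended answer.
def D_isValid (weight : List Int) (boat : Int) (D : Int) : Prop :=
  D ≤ 0 ∧ weight.sum ≤ boat * D ∧ (∀ w ∈ weight, w ≤ boat) ∧ ¬(weight = [] ∧ D = 0)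
instance (weight : List Int) (boat : Int) (D : Int) : Decidable (D_isValid weight boat D) := by
  unfold D_isValid; infer_instance

def Spec_isValid (weight : List Int) (boat : Int) (D : Int) (out : Bool) : Prop :=
  ¬ D_isValid weight boat D → out = isValid_alt weight boat D
instance (weight : List Int) (boat : Int) (D : Int) (out : Bool) : Decidable (Spec_isValid weight boat D out) := by
  unfold Spec_isValid; infer_instance

def pvDiffWitness_isValid : List Int × Int × Int := ([-1], 1, 0)
def pvDiffWitnessOut_isValid : Bool × Bool := (true, false)

-- ===== CLAIM (what is proved, stated in full; the proofs are below) =====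
def Claim_unchanged_isValid : Prop := ∀ (weight : List Int) (boat : Int) (D : Int), Dom_isValid weight boat D → Pre_isValid weight boat D → Spec_isValid weight boat D (isValid weight boat D)
def Claim_changed_isValid : Prop := Dom_isValid (pvDiffWitness_isValid.1) (pvDiffWitness_isValid.2.1) (pvDiffWitness_isValid.2.2) ∧ Pre_isValid (pvDiffWitness_isValid.1) (pvDiffWitness_isValid.2.1) (pvDiffWitness_isValid.2.2) ∧ D_isValid (pvDiffWitness_isValid.1) (pvDiffWitness_isValid.2.1) (pvDiffWitness_isValid.2.2) ∧ isValid (pvDiffWitness_isValid.1) (pvDiffWitness_isValid.2.1) (pvDiffWitness_isValid.2.2) = pvDiffWitnessOut_isValid.1 ∧ isValid_alt (pvDiffWitness_isValid.1) (pvDiffWitness_isValid.2.1) (pvDiffWitness_isValid.2.2) = pvDiffWitnessOut_isValid.2 ∧ pvDiffWitnessOut_isValid.1 ≠ pvDiffWitnessOut_isValid.2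
def Claim_exact_isValid : Prop := ∀ (weight : List Int) (boat : Int) (D : Int), Dom_isValid weight boat D → Pre_isValid weight boat D → D_isValid weight boat D → isValid weight boat D ≠ isValid_alt weight boat D

-- ===== LEMMAS AND PROOFS =====

-- Proof-side one-pass form of B's segment recursion: carries (boats opened so far, current load);
-- used only as a stepping stone between A's loop and boatsNeeded.
def altScan (ws : List Int) (boat : Int) (boats : Int) (cnt : Int) : Option Int :=
  match ws with
  | [] => some boats
  | w :: rest =>
    if boats = 0 ∨ cnt + w > boat then
      if w > boat then none
      else altScan rest boat (boats + 1) w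
    else altScan rest boat boats (cnt + w)

-- the scan's boat counter only grows.
theorem altScan_mono (ws : List Int) (boat boats cnt b : Int)
    (h : altScan ws boat boats cnt = some b) : boats ≤ b := by
  induction ws generalizing boats cnt with
  | nil => simp [altScan] at h; omega
  | cons w rest ih =>
    simp only [altScan] at h
    split at h
    · split at h
      · exact absurd h (by simp)
      · have := ih _ _ h; omega
    · exact ih _ _ h

-- Bridge: with an open boat (boats ≥ 1, load cnt) the scan is boats plus the segment count of
-- what remains after the current boat is filled to its maximal prefix.
theorem altScan_seg (boat : Int) (ws : List Int) (cnt boats : Int) (fuel : Nat)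
    (hb : 1 ≤ boats) (hfuel : (ws.drop (fitPrefix ws boat cnt)).length ≤ fuel) :
    altScan ws boat boats cnt =
      (match boatsNeeded fuel (ws.drop (fitPrefix ws boat cnt)) boat with
       | none => none
       | some r => some (boats + r)) := by
  induction ws generalizing cnt boats fuel with
  | nil => cases fuel <;> simp [altScan, fitPrefix, boatsNeeded]
  | cons w rest ih =>
    simp only [altScan, fitPrefix]
    by_cases hfit : cnt + w ≤ boat
    · rw [if_neg (by omega : ¬(boats = 0 ∨ cnt + w > boat)), if_pos hfit]
      simp only [fitPrefix, if_pos hfit, List.drop_succ_cons] at hfuel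
      rw [ih (cnt + w) boats fuel hb hfuel]
      simp only [List.drop_succ_cons]
    · rw [if_pos (Or.inr (by omega)), if_neg (by omega : ¬(cnt + w ≤ boat))]
      simp only [List.drop_zero]
      simp only [fitPrefix, if_neg (by omega : ¬(cnt + w ≤ boat)), List.drop_zero,
        List.length_cons] at hfuel
      obtain ⟨g, rfl⟩ : ∃ g, fuel = g + 1 := ⟨fuel - 1, by omega⟩
      by_cases hw : w > boat
      · rw [if_pos hw]
        rw [show boatsNeeded (g + 1) (w :: rest) boat = none by simp [boatsNeeded, hw]]
      · rw [if_neg hw]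
        have hg : ((rest.drop (fitPrefix rest boat w)).length ≤ g) := by
          rw [List.length_drop]; omega
        rw [ih w (boats + 1) g (by omega) hg]
        rw [show boatsNeeded (g + 1) (w :: rest) boat =
              (match boatsNeeded g (rest.drop (fitPrefix rest boat w)) boat with
               | none => none
               | some r => some (1 + r)) by simp [boatsNeeded, hw]]
        cases boatsNeeded g (rest.drop (fitPrefix rest boat w)) boat with
        | none => rfl
        | some r => simp; ring

-- Bridge at the start state: the scan from (0,0) computes exactly boats_needed.
theorem altScan_boatsNeeded (ws : List Int) (boat : Int) :
    altScan ws boat 0 0 = (boatsNeeded ws.length ws boat).map (fun n => (n : Int)) := by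
  cases ws with
  | nil => simp [altScan, boatsNeeded]
  | cons w rest =>
    simp only [altScan]
    rw [if_pos (Or.inl (by trivial))]
    by_cases hw : w > boat
    · rw [if_pos hw, show boatsNeeded (w :: rest).length (w :: rest) boat = none by
        simp [List.length_cons, boatsNeeded, hw]]
      rfl
    · have hg : ((rest.drop (fitPrefix rest boat w)).length ≤ rest.length) := by
        rw [List.length_drop]; omega
      rw [if_neg hw, zero_add, altScan_seg boat rest w 1 rest.length le_rfl hg]
      rw [show boatsNeeded (w :: rest).length (w :: rest) boat =
            (match boatsNeeded rest.length (rest.drop (fitPrefix rest boat w)) boat with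
             | none => none
             | some r => some (1 + r)) by simp [List.length_cons, boatsNeeded, hw]]
      cases boatsNeeded rest.length (rest.drop (fitPrefix rest boat w)) boat with
      | none => rfl
      | some r => simp

-- A stalls on an over-capacity item with an empty current load: D is burned down to 0.
theorem isValidLoop_stall (boat w : Int) (rest : List Int) (D : Int) (fuel : Nat)
    (hw : w > boat) (hD : 1 ≤ D) (hf : D.toNat ≤ fuel) :
    isValidLoop fuel (w :: rest) boat 0 D = false := by
  induction fuel generalizing D with
  | zero => simp [isValidLoop]
  | succ f ih =>
    simp only [isValidLoop]
    rw [if_pos (by omega)]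
    by_cases h1 : D - 1 = 0
    · simp [h1]
    · rw [if_neg h1]
      exact ih (D - 1) (by omega) (by omega)

-- Core invariant for D ≥ 1 with an already-open boat (boats ≥ 1, cnt = its current load):
-- A's loop succeeds iff the scan opens fewer than D further boats.
theorem loop_corr (ws : List Int) (boat : Int) (cnt boats D : Int) (fuel : Nat)
    (hD : 1 ≤ D) (hb : 1 ≤ boats)
    (hf : 2 * ws.length + D.toNat + 1 ≤ fuel) :
    isValidLoop fuel ws boat cnt D =
      (match altScan ws boat boats cnt with
       | none => false
       | some b => decide (b - boats < D)) := by
  induction ws generalizing cnt boats D fuel with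
  | nil =>
    cases fuel with
    | zero => simp only [List.length_nil] at hf; omega
    | succ f =>
      simp only [isValidLoop, altScan, sub_self]
      have h0 : (0:Int) < D := by omega
      simp [h0]
  | cons w rest ih =>
    cases fuel with
    | zero => simp only [List.length_cons] at hf; omega
    | succ f =>
      simp only [isValidLoop, altScan]
      have hlen : 2 * rest.length + D.toNat + 2 ≤ f := by
        simp only [List.length_cons] at hf; omega
      by_cases htrig : cnt + w > boat
      · rw [if_pos htrig, if_pos (Or.inr htrig)]
        by_cases hw : w > boat
        · rw [if_pos hw]
          by_cases h1 : D - 1 = 0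
          · simp [h1]
          · rw [if_neg h1]
            exact isValidLoop_stall boat w rest (D - 1) f hw (by omega) (by omega)
        · rw [if_neg hw]
          by_cases h1 : D - 1 = 0
          · rw [if_pos h1]
            cases h : altScan rest boat (boats + 1) w with
            | none => rfl
            | some b =>
              have := altScan_mono rest boat (boats + 1) w b h
              simp only []
              rw [decide_eq_false (by omega)]
          · rw [if_neg h1]
            cases f with
            | zero => omega
            | succ f' =>
              simp only [isValidLoop]
              rw [if_neg (by omega : ¬(0 + w > boat)), zero_add]
              rw [ih w (boats + 1) (D - 1) f' (by omega) (by omega) (by omega)]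
              cases h : altScan rest boat (boats + 1) w with
              | none => rfl
              | some b =>
                simp only [decide_eq_decide]
                omega
      · rw [if_neg htrig, if_neg (show ¬(boats = 0 ∨ cnt + w > boat) by omega)]
        exact ih (cnt + w) boats D f hD hb (by omega)

-- In the D_ region (all items fit, D ≤ 0) A's loop always terminates with true:
-- each retry re-fits the item into an emptied boat and D never hits 0 from below.
theorem isValidLoop_small (ws : List Int) (boat : Int) (cnt D : Int) (fuel : Nat)
    (hall : ∀ w ∈ ws, w ≤ boat) (hD : D ≤ 0)
    (hf : 2 * ws.length + 1 ≤ fuel) :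
    isValidLoop fuel ws boat cnt D = true := by
  induction ws generalizing cnt D fuel with
  | nil =>
    cases fuel with
    | zero => omega
    | succ f => simp [isValidLoop]
  | cons w rest ih =>
    cases fuel with
    | zero => simp only [List.length_cons] at hf; omega
    | succ f =>
      have hw : w ≤ boat := hall w (by simp)
      have hrest : ∀ x ∈ rest, x ≤ boat := fun x hx => hall x (by simp [hx])
      have hlen : 2 * rest.length + 2 ≤ f := by
        simp only [List.length_cons] at hf; omega
      simp only [isValidLoop]
      by_cases htrig : cnt + w > boat
      · rw [if_pos htrig, if_neg (by omega : ¬(D - 1 = 0))]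
        cases f with
        | zero => omega
        | succ f' =>
          simp only [isValidLoop]
          rw [if_neg (by omega : ¬(0 + w > boat)), zero_add]
          exact ih w (D - 1) f' hrest (by omega) (by omega)
      · rw [if_neg htrig]
        exact ih (cnt + w) D f hrest hD (by omega)

-- B's result rewritten through the one-pass scan.
theorem isValid_alt_scan (weight : List Int) (boat D : Int) :
    isValid_alt weight boat D =
      (if boat * D < weight.sum then false
       else match altScan weight boat 0 0 with
            | none => false
            | some b => decide (b ≤ D)) := by
  unfold isValid_alt
  rw [altScan_boatsNeeded]
  cases boatsNeeded weight.length weight boat with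
  | none => rfl
  | some n => rfl

-- ===== VERDICT (by name: the statement is the Claim_ definition above) =====
theorem isValid_spec : Claim_unchanged_isValid := by
  intro weight boat D hdom hpre hnd
  show isValid weight boat D = isValid_alt weight boat D
  rw [isValid_alt_scan]
  unfold isValid
  by_cases hpf : boat * D < weight.sum
  · rw [if_pos hpf, if_pos hpf]
  · rw [if_neg hpf, if_neg hpf]
    by_cases hD : 1 ≤ D
    · cases weight with
      | nil =>
        simp [isValidLoop, altScan]
        omega
      | cons w rest =>
        by_cases hw : w > boat
        · rw [isValidLoop_stall boat w rest D _ hw hD (by omega)]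
          simp only [altScan]
          rw [if_pos (Or.inl (by trivial)), if_pos hw]
        · simp only [isValidLoop]
          rw [if_neg (by omega : ¬(0 + w > boat)), zero_add]
          rw [loop_corr rest boat w 1 D _ hD (by omega)
              (by simp [List.length]; omega)]
          simp only [altScan]
          rw [if_pos (Or.inl (by trivial)), if_neg hw]
          simp only [zero_add]
          cases h : altScan rest boat 1 w with
          | none => rfl
          | some b => simp only [decide_eq_decide]; omega
    · -- D ≤ 0: Pre_ forces all items small; ¬D_ then forces weight = [] ∧ D = 0
      have hall : ∀ w ∈ weight, w ≤ boat := by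
        rcases hpre with h | h | h
        · omega
        · exact absurd h hpf
        · exact h
      have hkey : weight = [] ∧ D = 0 := by
        by_contra hne
        exact hnd ⟨by omega, by omega, hall, hne⟩
      rcases hkey with ⟨h1, h2⟩
      subst h1; subst h2
      simp [isValidLoop, altScan]

theorem isValid_changed : Claim_changed_isValid := by
  unfold Claim_changed_isValid; decide

theorem isValid_tight : Claim_exact_isValid := by
  intro weight boat D hdom hpre hd
  rcases hd with ⟨hD, hpf, hall, hne⟩
  have hA : isValid weight boat D = true := by
    unfold isValid
    rw [if_neg (by omega)]
    exact isValidLoop_small weight boat 0 D _ hall hD (by omega)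
  have hB : isValid_alt weight boat D = false := by
    rw [isValid_alt_scan]
    rw [if_neg (by omega)]
    cases weight with
    | nil =>
      simp only [altScan]
      have : D ≠ 0 := fun h => hne ⟨rfl, h⟩
      simp; omega
    | cons w rest =>
      simp only [altScan]
      rw [if_pos (Or.inl (by trivial)), if_neg (by have := hall w (by simp); omega)]
      simp only [zero_add]
      cases h : altScan rest boat 1 w with
      | none => rfl
      | some b =>
        have := altScan_mono rest boat 1 w b h
        simp; omega
  rw [hA, hB]; simp
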